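-- pv_equiv track=rewrite | github.com/kganjam/arc-agi-2-solver | arc_realtime_visualizer.py | generate_growth_animation
-- ===== SOURCE A (Python) =====
-- from typing import Dict, List, Any
--
-- def generate_growth_animation(start: List, end: List) -> List:
--     """Generate frames showing pattern growth"""
--     frames = []
--     # Simplified growth animation
--     for size in range(1, max(len(end), len(end[0])) + 1):
--         frame = [[0 for _ in range(size)] for _ in range(size)]
--         for i in range(min(size, len(end))):
--             for j in range(min(size, len(end[0]))):
--                 if i < len(end) and j < len(end[0]):
--                     frame[i][j] = end[i][j]
--         frames.append(frame)
--     return frames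
-- ===== SOURCE B (Python) =====
-- def generate_growth_animation(start, end):
--     """Generate frames by growing one running grid a border at a time."""
--     h, w = len(end), len(end[0])
--
--     def cell(i, j):
--         return end[i][j] if i < h and j < w else 0
--
--     frames = []
--     grid = []
--     for size in range(1, max(h, w) + 1):
--         for i, row in enumerate(grid):
--             row.append(cell(i, size - 1))
--         grid.append([cell(size - 1, j) for j in range(size)])
--         frames.append([row[:] for row in grid])
--     return frames
-- ===== Notes on version B (the rewrite author's own statement) =====
-- stated objective: faster
-- what changed: B keeps one running grid and grows it by a single border (one cell per existing row plus one new bottom row) per frame, instead of A's per-frame rebuild of a zero grid followed by a full nested re-scan of end; each frame is a deep copy of the grown grid, so per-frame fill work shrinks from O(size^2) to O(size) plus the unavoidable copy.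
-- outside the precondition, e.g. on generate_growth_animation([], []): A raises IndexError, B raises IndexError; on generate_growth_animation([], [[1, 2], [3]]): A raises IndexError, B raises IndexError
import Mathlib
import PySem

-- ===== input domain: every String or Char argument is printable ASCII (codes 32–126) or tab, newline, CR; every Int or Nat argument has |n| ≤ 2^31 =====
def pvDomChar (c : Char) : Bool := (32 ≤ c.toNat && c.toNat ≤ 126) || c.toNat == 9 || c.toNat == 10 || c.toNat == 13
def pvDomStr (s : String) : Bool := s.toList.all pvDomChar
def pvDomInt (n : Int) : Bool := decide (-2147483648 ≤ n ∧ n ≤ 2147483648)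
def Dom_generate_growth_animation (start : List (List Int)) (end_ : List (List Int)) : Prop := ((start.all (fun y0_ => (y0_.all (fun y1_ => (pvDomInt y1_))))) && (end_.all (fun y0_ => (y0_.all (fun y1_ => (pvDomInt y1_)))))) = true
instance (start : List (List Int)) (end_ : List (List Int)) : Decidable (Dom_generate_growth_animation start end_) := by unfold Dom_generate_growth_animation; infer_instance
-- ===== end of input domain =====

-- B grows one running grid by a border per frame instead of re-scanning `end` per frame
-- (objective: alternative decomposition; return value only — A mutates nothing observable).

-- ===== PORT A =====
-- Literal port of A: per frame, build a size×size zero grid, then overwrite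
-- frame[i][j] by end[i][j] with nested index loops (List.set = in-place assignment).
def generate_growth_animation (start : List (List Int)) (end_ : List (List Int)) : List (List (List Int)) :=
  let h := end_.length
  let w := (end_.headD []).length
  (List.range' 1 (max h w)).foldl (fun frames size =>
    let frame0 := (List.range size).map (fun _ => (List.range size).map (fun _ => (0 : Int)))
    let frame := (List.range (min size h)).foldl (fun fr i =>
      (List.range (min size w)).foldl (fun fr j =>
        if i < h ∧ j < w then fr.set i ((fr.getD i []).set j ((end_.getD i []).getD j 0)) else fr)
        fr) frame0
    frames ++ [frame]) []

-- ===== PORT B =====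
def cellB (end_ : List (List Int)) (i j : Nat) : Int :=
  if i < end_.length ∧ j < (end_.headD []).length then (end_.getD i []).getD j 0 else 0

-- Literal port of B: the running grid grows by one column cell per existing row
-- plus one new bottom row each step; each grown grid is appended to the frames.
def generate_growth_animation_alt (start : List (List Int)) (end_ : List (List Int)) : List (List (List Int)) :=
  let st := (List.range' 1 (max end_.length (end_.headD []).length)).foldl
    (fun (st : List (List Int) × List (List (List Int))) size =>
      let grid := (st.1.zipIdx.map (fun p => p.1 ++ [cellB end_ p.2 (size - 1)]))
                  ++ [(List.range size).map (fun j => cellB end_ (size - 1) j)]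
      (grid, st.2 ++ [grid]))
    ([], [])
  st.2

-- ===== PRECONDITION & SPEC =====
-- Pre_ excludes exactly the inputs where Python A raises IndexError: empty `end`
-- (end[0]) and ragged grids with a row shorter than row 0 (end[i][j]).
def Pre_generate_growth_animation (start : List (List Int)) (end_ : List (List Int)) : Prop :=
  end_ ≠ [] ∧ ∀ row ∈ end_, (end_.headD []).length ≤ row.length
instance (start : List (List Int)) (end_ : List (List Int)) : Decidable (Pre_generate_growth_animation start end_) := by unfold Pre_generate_growth_animation; infer_instance

def pvWitness_generate_growth_animation : List (List Int) × List (List Int) :=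
  ([[1]], [[1, 2], [3, 4]])

def Spec_generate_growth_animation (start : List (List Int)) (end_ : List (List Int)) (out : List (List (List Int))) : Prop := out = generate_growth_animation_alt start end_
instance (start : List (List Int)) (end_ : List (List Int)) (out : List (List (List Int))) : Decidable (Spec_generate_growth_animation start end_ out) := by unfold Spec_generate_growth_animation; infer_instance

-- ===== CLAIM (what is proved, stated in full; the proofs are below) =====
def Claim_equal_generate_growth_animation : Prop := ∀ (start : List (List Int)) (end_ : List (List Int)), Dom_generate_growth_animation start end_ → Pre_generate_growth_animation start end_ → Spec_generate_growth_animation start end_ (generate_growth_animation start end_)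

-- ===== LEMMAS AND PROOFS =====

-- the per-frame answer both programs compute
def specFrame (end_ : List (List Int)) (size : Nat) : List (List Int) :=
  (List.range size).map (fun i => (List.range size).map (fun j => cellB end_ i j))

theorem set_map_range {α : Type} (n k : Nat) (g : Nat → α) (v : α) (hk : k < n) :
    ((List.range n).map g).set k v = (List.range n).map (fun j => if j = k then v else g j) := by
  apply List.ext_getElem
  · simp
  · intro i h1 h2
    simp only [List.getElem_set, List.getElem_map, List.getElem_range]
    by_cases h : k = i
    · subst h; simp
    · rw [if_neg h, if_neg (fun hh => h hh.symm)]

theorem getD_map_range {α : Type} (n k : Nat) (g : Nat → α) (d : α) (hk : k < n) :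
    ((List.range n).map g).getD k d = g k := by
  rw [List.getD_eq_getElem _ _ (by simpa using hk)]
  simp

theorem wr_spec (e : Nat → Int) (k n : Nat) (f : Nat → Int) (hk : k ≤ n) :
    (List.range k).foldl (fun r j => r.set j (e j)) ((List.range n).map f)
      = (List.range n).map (fun j => if j < k then e j else f j) := by
  induction k with
  | zero =>
      simp only [List.range_zero, List.foldl_nil]
      exact (List.map_congr_left (fun j _ => by simp)).symm
  | succ k ih =>
      rw [List.range_succ, List.foldl_append, ih (by omega)]
      simp only [List.foldl_cons, List.foldl_nil]
      rw [set_map_range n k _ _ (by omega)]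
      apply List.map_congr_left
      intro j hj
      rcases Nat.lt_trichotomy j k with h | h | h <;> simp_all <;> omega

theorem getD_set_self {α : Type} (l : List α) (i : Nat) (a d : α) (h : i < l.length) :
    (l.set i a).getD i d = a := by
  rw [List.getD_eq_getElem _ _ (by simpa using h)]
  exact List.getElem_set_self (by simpa using h)

theorem inner_spec (e : Nat → Int) (i : Nat) (k : Nat) (fr : List (List Int))
    (hi : i < fr.length) :
    (List.range k).foldl (fun fr j => fr.set i ((fr.getD i []).set j (e j))) fr
      = fr.set i ((List.range k).foldl (fun r j => r.set j (e j)) (fr.getD i [])) := by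
  induction k with
  | zero =>
      simp only [List.range_zero, List.foldl_nil]
      rw [List.getD_eq_getElem _ _ hi, List.set_getElem_self]
  | succ k ih =>
      rw [List.range_succ, List.foldl_append, List.foldl_append, ih]
      simp only [List.foldl_cons, List.foldl_nil]
      rw [getD_set_self _ _ _ _ hi, List.set_set]

theorem outer_spec (end_ : List (List Int)) (size k : Nat) (hk : k ≤ size)
    (hks : k ≤ end_.length) :
    (List.range k).foldl (fun fr i =>
        (List.range (min size (end_.headD []).length)).foldl (fun fr j =>
          if i < end_.length ∧ j < (end_.headD []).length then
            fr.set i ((fr.getD i []).set j ((end_.getD i []).getD j 0)) else fr) fr)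
      ((List.range size).map (fun _ => (List.range size).map (fun _ => (0 : Int))))
    = (List.range size).map (fun i => (List.range size).map (fun j =>
        if i < k ∧ j < min size (end_.headD []).length then (end_.getD i []).getD j 0 else 0)) := by
  induction k with
  | zero =>
      simp only [List.range_zero, List.foldl_nil]
      exact List.map_congr_left (fun i _ => List.map_congr_left (fun j _ => by simp))
  | succ k ih =>
      rw [List.range_succ, List.foldl_append, ih (by omega) (by omega)]
      simp only [List.foldl_cons, List.foldl_nil]
      have hcong : ∀ (fr : List (List Int)),
          (List.range (min size (end_.headD []).length)).foldl (fun fr j =>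
            if k < end_.length ∧ j < (end_.headD []).length then
              fr.set k ((fr.getD k []).set j ((end_.getD k []).getD j 0)) else fr) fr
          = (List.range (min size (end_.headD []).length)).foldl (fun fr j =>
              fr.set k ((fr.getD k []).set j ((end_.getD k []).getD j 0))) fr := by
        intro fr
        apply PySem.List.foldl_congr_mem
        intro acc x hx
        simp only [List.mem_range] at hx
        exact if_pos ⟨by omega, by omega⟩
      rw [hcong]
      rw [inner_spec _ _ _ _ (by simp; omega)]
      rw [getD_map_range _ _ _ _ (by omega)]
      rw [wr_spec _ _ _ _ (by omega)]
      rw [set_map_range _ _ _ _ (by omega)]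
      apply List.map_congr_left
      intro i hi
      simp only [List.mem_range] at hi
      rcases Nat.lt_trichotomy i k with h | h | h
      · rw [if_neg (by omega)]
        apply List.map_congr_left; intro j hj
        simp only [List.mem_range] at hj
        by_cases hjw : j < min size (end_.headD []).length
        · rw [if_pos ⟨by omega, hjw⟩, if_pos ⟨by omega, hjw⟩]
        · rw [if_neg (by omega), if_neg (by omega)]
      · subst h
        rw [if_pos rfl]
        apply List.map_congr_left; intro j hj
        simp only [List.mem_range] at hj
        by_cases hjw : j < min size (end_.headD []).length
        · rw [if_pos hjw, if_pos ⟨by omega, hjw⟩]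
        · simp
      · rw [if_neg (by omega)]
        apply List.map_congr_left; intro j hj
        rw [if_neg (by omega), if_neg (by omega)]

-- A's per-frame computation is specFrame (for 1 ≤ size ≤ max h w it matters; true for all size)
theorem frameA_eq (end_ : List (List Int)) (size : Nat) :
    (List.range (min size end_.length)).foldl (fun fr i =>
        (List.range (min size (end_.headD []).length)).foldl (fun fr j =>
          if i < end_.length ∧ j < (end_.headD []).length then
            fr.set i ((fr.getD i []).set j ((end_.getD i []).getD j 0)) else fr) fr)
      ((List.range size).map (fun _ => (List.range size).map (fun _ => (0 : Int))))
    = specFrame end_ size := by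
  rw [outer_spec end_ size _ (by omega) (by omega)]
  unfold specFrame
  apply List.map_congr_left
  intro i hi
  simp only [List.mem_range] at hi
  apply List.map_congr_left
  intro j hj
  simp only [List.mem_range] at hj
  unfold cellB
  by_cases hih : i < end_.length <;> by_cases hjw : j < (end_.headD []).length
  · rw [if_pos ⟨by omega, by omega⟩, if_pos ⟨hih, hjw⟩]
  all_goals rw [if_neg (by omega), if_neg (by tauto)]

theorem foldl_concat {α β : Type} (f : α → β) (l : List α) (init : List β) :
    l.foldl (fun acc x => acc ++ [f x]) init = init ++ l.map f := by
  induction l generalizing init with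
  | nil => simp
  | cons x l ih => simp [ih]

theorem zipIdx_map_range {α : Type} (n : Nat) (f : Nat → α) :
    ((List.range n).map f).zipIdx = (List.range n).map (fun i => (f i, i)) := by
  apply List.ext_getElem
  · simp
  · intro i h1 h2
    simp

-- B's grid grows from specFrame k to specFrame (k+1)
theorem grow_spec (end_ : List (List Int)) (k : Nat) :
    ((specFrame end_ k).zipIdx.map (fun p => p.1 ++ [cellB end_ p.2 (k + 1 - 1)]))
      ++ [(List.range (k + 1)).map (fun j => cellB end_ ((k + 1) - 1) j)]
    = specFrame end_ (k + 1) := by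
  simp only [Nat.add_sub_cancel]
  unfold specFrame
  rw [zipIdx_map_range, List.map_map]
  conv_rhs => rw [List.range_succ]
  rw [List.map_append]
  congr 1
  · apply List.map_congr_left
    intro i hi
    simp
  · simp [List.range_succ]

theorem alt_fold_spec (end_ : List (List Int)) (m : Nat) :
    (List.range' 1 m).foldl
      (fun (st : List (List Int) × List (List (List Int))) size =>
        let grid := (st.1.zipIdx.map (fun p => p.1 ++ [cellB end_ p.2 (size - 1)]))
                    ++ [(List.range size).map (fun j => cellB end_ (size - 1) j)]
        (grid, st.2 ++ [grid]))
      ([], [])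
    = (specFrame end_ m, (List.range' 1 m).map (specFrame end_)) := by
  induction m with
  | zero => simp [specFrame]
  | succ m ih =>
      rw [List.range'_1_concat, List.foldl_append, ih]
      simp only [List.foldl_cons, List.foldl_nil, Nat.add_comm 1 m]
      rw [grow_spec]
      simp

-- ===== VERDICT (by name: the statement is the Claim_ definition above) =====
theorem generate_growth_animation_spec : Claim_equal_generate_growth_animation := by
  intro start end_ _ _
  unfold Spec_generate_growth_animation generate_growth_animation generate_growth_animation_alt
  rw [alt_fold_spec]
  simp only []
  have hcong :
      (List.range' 1 (max end_.length (end_.headD []).length)).foldl (fun frames size =>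
        frames ++ [(List.range (min size end_.length)).foldl (fun fr i =>
            (List.range (min size (end_.headD []).length)).foldl (fun fr j =>
              if i < end_.length ∧ j < (end_.headD []).length then
                fr.set i ((fr.getD i []).set j ((end_.getD i []).getD j 0)) else fr) fr)
          ((List.range size).map (fun _ => (List.range size).map (fun _ => (0 : Int))))]) []
      = (List.range' 1 (max end_.length (end_.headD []).length)).foldl (fun frames size =>
          frames ++ [specFrame end_ size]) [] := by
    apply PySem.List.foldl_congr_mem
    intro acc size _
    rw [frameA_eq end_ size]
  rw [hcong, foldl_concat]
  simp
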